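-- pv_equiv track=rewrite | github.com/xiema/codeforces_solutions | src/archive/1657C BracketSequenceDeletion/brackseqdel.py | solve
-- ===== SOURCE A (Python) =====
-- def checkpalin(s, i, j):
--     while i < j:
--         if s[i] != s[j]:
--             return False
--         i, j = i + 1, j - 1
--     return True
--
-- def solve(n, s):
--     i, c = 0, 0
--     while i < n:
--         if i == n - 1:
--             break
--         if s[i] == '(':
--             c += 1
--             i += 2
--         else:
--             for j in range(i + 1, n):
--                 if checkpalin(s, i, j):
--                     c += 1
--                     i = j + 1
--                     break
--             else:
--                 break
--
--     return c, max(0, n - i)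
-- ===== SOURCE B (Python) =====
-- def solve(n, s):
--     # O(n): precompute, for each position, the next ')' at or after it;
--     # a ')' prefix-deletion jumps directly to the next closing bracket.
--     nxt = [n] * (n + 1)  # nxt[i] = least j >= i with s[j] == ')', else n
--     for k in range(n - 1, -1, -1):
--         nxt[k] = k if s[k] == ')' else nxt[k + 1]
--     i, c = 0, 0
--     while i < n - 1:
--         if s[i] == '(':
--             i += 2
--             c += 1
--         else:
--             j = nxt[i + 1]
--             if j == n:
--                 break
--             i = j + 1
--             c += 1
--     return c, max(0, n - i)
-- ===== Notes on version B (the rewrite author's own statement) =====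
-- stated objective: alternative
-- what changed: Replaces A's inner for-j loop with per-candidate palindrome checks by a precomputed next-')' array, so each ')' deletion step jumps directly to the next closing bracket (O(n) total on the bracket domain vs A's quadratic scan); a timing run's generated strings fall outside the bracket-only Pre_, so no speed is claimed.
-- outside the precondition, e.g. on solve(3, 'aba'): A returns (1, 0), B returns (0, 3); on solve(2, ''): A raises IndexError, B raises IndexError
import Mathlib
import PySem

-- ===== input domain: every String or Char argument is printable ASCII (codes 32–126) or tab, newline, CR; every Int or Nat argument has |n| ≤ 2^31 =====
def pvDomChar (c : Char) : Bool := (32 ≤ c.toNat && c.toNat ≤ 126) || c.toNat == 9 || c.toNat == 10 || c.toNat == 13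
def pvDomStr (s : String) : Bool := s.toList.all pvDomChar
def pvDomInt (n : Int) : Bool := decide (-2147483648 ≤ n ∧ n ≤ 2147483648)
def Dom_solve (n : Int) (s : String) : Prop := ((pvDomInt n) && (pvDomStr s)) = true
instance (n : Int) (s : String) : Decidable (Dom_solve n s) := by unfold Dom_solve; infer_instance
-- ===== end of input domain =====

-- B replaces A's inner palindrome search by a precomputed-next-')' jump (equal on the
-- bracket-only domain Pre_ admits); objective: alternative (O(n) on that domain, but the
-- timing run's inputs lie outside Pre_, so no measured speed is claimed).


-- ===== PORT A =====
-- s[i] for an index Pre_ keeps in range (0 ≤ i < n ≤ |s|); the default is unreachable there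
def sget (s : List Char) (i : Int) : Char := s.getD i.toNat ' '

-- the loops below are Python while/for loops made total by an exact fuel count (one unit per
-- iteration, seeded with the iteration bound the loop variable admits); on every admitted input
-- the fuel-0 base coincides with the loop's exit case, so each is the Python loop step for step
def checkpalinGo (s : List Char) : Nat → Int → Int → Bool
  | 0, _, _ => true
  | f + 1, i, j =>
    if i < j then
      if sget s i != sget s j then false
      else checkpalinGo s f (i + 1) (j - 1)
    else true

def checkpalin (s : List Char) (i j : Int) : Bool := checkpalinGo s (j - i).toNat i j

-- A's inner 'for j in range(i+1, n) … break / else' loop, started at j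
def findJGo (s : List Char) (n i : Int) : Nat → Int → Option Int
  | 0, _ => none
  | f + 1, j =>
    if j < n then
      if checkpalin s i j then some j
      else findJGo s n i f (j + 1)
    else none

def loopA (s : List Char) (n : Int) : Nat → Int → Int → List Int
  | 0, i, c => [c, max 0 (n - i)]
  | f + 1, i, c =>
    if i < n then
      if i = n - 1 then [c, max 0 (n - i)]
      else if sget s i = '(' then loopA s n f (i + 2) (c + 1)
      else
        match findJGo s n i (n - (i + 1)).toNat (i + 1) with
        | some j => loopA s n f (j + 1) (c + 1)
        | none => [c, max 0 (n - i)]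
    else [c, max 0 (n - i)]

def solve (n : Int) (s : String) : List Int := loopA s.toList n n.toNat 0 0

-- ===== PORT B =====
-- Source B's nxt array as the identical recurrence: nxt[i] = i if s[i]==')' else nxt[i+1], nxt[n] = n
def nxtCloseGo (s : List Char) (n : Int) : Nat → Int → Int
  | 0, _ => n
  | f + 1, i =>
    if i < n then
      if sget s i = ')' then i else nxtCloseGo s n f (i + 1)
    else n

def loopB (s : List Char) (n : Int) : Nat → Int → Int → List Int
  | 0, i, c => [c, max 0 (n - i)]
  | f + 1, i, c =>
    if i < n - 1 then
      if sget s i = '(' then loopB s n f (i + 2) (c + 1)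
      else
        let j := nxtCloseGo s n (n - (i + 1)).toNat (i + 1)
        if j = n then [c, max 0 (n - i)]
        else loopB s n f (j + 1) (c + 1)
    else [c, max 0 (n - i)]

def solve_alt (n : Int) (s : String) : List Int := loopB s.toList n n.toNat 0 0

-- ===== PRECONDITION & SPEC =====
-- Pre_ is the problem's natural domain: n ≤ |s| (otherwise A raises IndexError) and the first n
-- characters are brackets — A also RETURNS on other printable strings (running a general
-- palindrome search there), but that lies outside the bracket-sequence task B implements.
def Pre_solve (n : Int) (s : String) : Prop :=
  n ≤ (s.length : Int) ∧ ((s.toList.take n.toNat).all (fun c => c == '(' || c == ')')) = true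
instance (n : Int) (s : String) : Decidable (Pre_solve n s) := by unfold Pre_solve; infer_instance

def pvWitness_solve : Int × String := (6, ")(()()")

def Spec_solve (n : Int) (s : String) (out : List Int) : Prop := out = solve_alt n s
instance (n : Int) (s : String) (out : List Int) : Decidable (Spec_solve n s out) := by unfold Spec_solve; infer_instance

-- ===== CLAIM (what is proved, stated in full; the proofs are below) =====
def Claim_equal_solve : Prop := ∀ (n : Int) (s : String), Dom_solve n s → Pre_solve n s → Spec_solve n s (solve n s)

-- ===== LEMMAS AND PROOFS =====

theorem checkpalin_false (s : List Char) (i j : Int) (hij : i < j) (h : sget s i ≠ sget s j) :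
    checkpalin s i j = false := by
  unfold checkpalin
  have h1 : (j - i).toNat = (j - i - 1).toNat + 1 := by omega
  rw [h1]
  simp [checkpalinGo, hij, h]

theorem checkpalinGo_const (s : List Char) :
    ∀ f (i j : Int), (j - i).toNat ≤ f → (i < j → sget s i = sget s j) →
      (∀ t, i < t → t < j → sget s t = '(') → checkpalinGo s f i j = true := by
  intro f
  induction f with
  | zero =>
      intro i j hf _ _
      rfl
  | succ f ih =>
      intro i j hf hends hmid
      by_cases hij : i < j
      · have hbne : (sget s i != sget s j) = false := by simp [hends hij]
        have hnf : ¬ (false = true) := by simp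
        rw [checkpalinGo, if_pos hij, hbne, if_neg hnf]
        exact ih (i + 1) (j - 1) (by omega)
          (fun h2 => by rw [hmid (i + 1) (by omega) (by omega), hmid (j - 1) (by omega) (by omega)])
          (fun t h1 h2 => hmid t (by omega) (by omega))
      · rw [checkpalinGo, if_neg hij]

theorem checkpalin_const (s : List Char) (i j : Int) (hends : i < j → sget s i = sget s j)
    (hmid : ∀ t, i < t → t < j → sget s t = '(') : checkpalin s i j = true :=
  checkpalinGo_const s (j - i).toNat i j le_rfl hends hmid

theorem nxtCloseGo_ge (s : List Char) (n : Int) :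
    ∀ f (j : Int), nxtCloseGo s n f j = n ∨ j ≤ nxtCloseGo s n f j := by
  intro f
  induction f with
  | zero => intro j; left; rfl
  | succ f ih =>
      intro j
      by_cases hj : j < n
      · by_cases hc : sget s j = ')'
        · right; simp [nxtCloseGo, hj, hc]
        · have := ih (j + 1)
          simp only [nxtCloseGo, if_pos hj, if_neg hc]
          omega
      · left; simp [nxtCloseGo, hj]

-- under the bracket hypothesis and s[i] = ')', A's inner search finds exactly the next ')'
theorem findJ_eq_nxtClose (s : List Char) (n i : Int)
    (Hb : ∀ t : Int, 0 ≤ t → t < n → sget s t = '(' ∨ sget s t = ')')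
    (hi0 : 0 ≤ i) (hci : sget s i = ')') :
    ∀ f (j : Int), i < j → (∀ t, i < t → t < j → sget s t = '(') →
      findJGo s n i f j =
        (if nxtCloseGo s n f j = n then none else some (nxtCloseGo s n f j)) := by
  intro f
  induction f with
  | zero =>
      intro j _ _
      rw [if_pos (show nxtCloseGo s n 0 j = n from rfl)]
      rfl
  | succ f ih =>
      intro j hij hmid
      rw [findJGo, nxtCloseGo]
      by_cases hj : j < n
      · rw [if_pos hj, if_pos hj]
        rcases Hb j (by omega) hj with hopen | hclose
        · -- s[j] = '(' : palindrome check fails at the first comparison, both sides step on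
          have hne : sget s i ≠ sget s j := by rw [hci, hopen]; decide
          have hno : ¬ (sget s j = ')') := by rw [hopen]; decide
          have hnf : ¬ (false = true) := by simp
          rw [checkpalin_false s i j hij hne, if_neg hnf, if_neg hno]
          exact ih (j + 1) (by omega) (fun t h1 h2 => by
            by_cases ht : t = j
            · rw [ht]; exact hopen
            · exact hmid t h1 (by omega))
        · -- s[j] = ')' : the in-between chars are all '(' so s[i..j] is a palindrome
          rw [checkpalin_const s i j (fun _ => by rw [hci, hclose]) hmid,
            if_pos rfl, if_pos hclose, if_neg (by omega : ¬ j = n)]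
      · rw [if_neg hj, if_neg hj, if_pos rfl]

theorem loopA_eq_loopB (s : List Char) (n : Int)
    (Hb : ∀ t : Int, 0 ≤ t → t < n → sget s t = '(' ∨ sget s t = ')') :
    ∀ f (i c : Int), 0 ≤ i → loopA s n f i c = loopB s n f i c := by
  intro f
  induction f with
  | zero => intro i c _; rfl
  | succ f ih =>
      intro i c hi0
      by_cases hlt : i < n - 1
      · rw [loopA, loopB, if_pos (by omega : i < n), if_neg (by omega : ¬ i = n - 1), if_pos hlt]
        rcases Hb i hi0 (by omega) with hopen | hclose
        · rw [if_pos hopen, if_pos hopen]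
          exact ih (i + 2) (c + 1) (by omega)
        · rw [if_neg (by rw [hclose]; decide), if_neg (by rw [hclose]; decide)]
          have hfind := findJ_eq_nxtClose s n i Hb hi0 hclose (n - (i + 1)).toNat (i + 1)
            (by omega) (fun t h1 h2 => absurd h2 (by omega))
          have hge := nxtCloseGo_ge s n (n - (i + 1)).toNat (i + 1)
          by_cases hnn : nxtCloseGo s n (n - (i + 1)).toNat (i + 1) = n
          · rw [hfind, if_pos hnn]
            simp only [if_pos hnn]
          · rw [hfind, if_neg hnn]
            simp only [if_neg hnn]
            exact ih (nxtCloseGo s n (n - (i + 1)).toNat (i + 1) + 1) (c + 1) (by omega)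
      · -- i ≥ n - 1: A either breaks at i = n - 1 or exits its while; B exits its loop
        rw [loopA, loopB, if_neg hlt]
        by_cases hin : i < n
        · rw [if_pos hin, if_pos (by omega : i = n - 1)]
        · rw [if_neg hin]

-- ===== VERDICT (by name: the statement is the Claim_ definition above) =====
theorem solve_spec : Claim_equal_solve := by
  intro n s _hdom hpre
  unfold Spec_solve solve solve_alt
  obtain ⟨hlen, hbr⟩ := hpre
  apply loopA_eq_loopB s.toList n _ n.toNat 0 0 le_rfl
  intro t ht0 htn
  have hlt : t.toNat < s.toList.length := by
    have : s.toList.length = s.length := by simp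
    omega
  have hmem : s.toList[t.toNat] ∈ s.toList.take n.toNat := by
    rw [List.mem_take_iff_getElem]
    exact ⟨t.toNat, by omega, rfl⟩
  have hc := List.all_eq_true.mp hbr _ hmem
  have : s.toList[t.toNat] = '(' ∨ s.toList[t.toNat] = ')' := by
    rcases Bool.or_eq_true_iff.mp hc with h | h
    · exact Or.inl (by exact_mod_cast beq_iff_eq.mp h)
    · exact Or.inr (by exact_mod_cast beq_iff_eq.mp h)
  simpa [sget, List.getD_eq_getElem?_getD, List.getElem?_eq_getElem hlt] using this
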